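-- pv_equiv track=rewrite | github.com/hmhyau/rl-intention | utils.py | encode_cartpole
-- ===== SOURCE A (Python) =====
-- from functools import reduce
--
-- def encode_cartpole(n_bins, digits):
--     out = 0
--     for i in reversed(range(len(digits))):
--         if i == 0:
--             out += digits[-(i+1)]
--         else:
--             out += reduce(lambda x, y: x*y, n_bins[-i:]) * digits[-(i+1)]
--     return out
-- ===== SOURCE B (Python) =====
-- def encode_cartpole(n_bins, digits):
--     nb = n_bins[::-1]
--     out = 0
--     prod = 1
--     for k, d in enumerate(reversed(digits)):
--         out += prod * d
--         if k < len(nb):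
--             prod *= nb[k]
--     return out
-- ===== Notes on version B (the rewrite author's own statement) =====
-- stated objective: faster
-- what changed: Replaced A's per-position reduce over a suffix slice of n_bins (recomputing the product from scratch at every digit) by a single backward pass that maintains a running cumulative product.
import Mathlib
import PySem

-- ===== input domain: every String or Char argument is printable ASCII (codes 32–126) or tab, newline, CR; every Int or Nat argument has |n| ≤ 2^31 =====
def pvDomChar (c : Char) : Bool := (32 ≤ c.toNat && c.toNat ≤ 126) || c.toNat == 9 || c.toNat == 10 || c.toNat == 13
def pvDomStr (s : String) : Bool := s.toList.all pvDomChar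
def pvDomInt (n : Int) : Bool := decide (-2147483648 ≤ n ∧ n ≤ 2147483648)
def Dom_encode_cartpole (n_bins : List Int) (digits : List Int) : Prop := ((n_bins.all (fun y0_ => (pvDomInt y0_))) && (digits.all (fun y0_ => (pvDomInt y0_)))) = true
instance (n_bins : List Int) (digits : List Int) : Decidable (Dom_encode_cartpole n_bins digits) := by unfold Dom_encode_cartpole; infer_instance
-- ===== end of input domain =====

-- B replaces A's per-position product of a suffix slice (O(L^2)) by a single pass
-- keeping a running cumulative product of n_bins (objective: faster).

-- ===== PORT A =====
-- reduce(lambda x, y: x*y, l): fold-left of (*) starting at the first element; [] raises TypeError (excluded by Pre_)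
def pvReduceMul (l : List Int) : Int :=
  match l with
  | [] => 0
  | h :: t => t.foldl (· * ·) h

def encode_cartpole (n_bins : List Int) (digits : List Int) : Int :=
  ((PySem.List.pyRange 0 (digits.length : Int) 1).reverse).foldl
    (fun out i =>
      if i == 0 then out + PySem.List.pyGetD digits (-(i + 1)) 0
      else out + pvReduceMul (PySem.List.slice n_bins (some (-i)) none) * PySem.List.pyGetD digits (-(i + 1)) 0)
    0

-- ===== PORT B =====
-- the for-loop of Source B: k counts positions of reversed(digits); prod is the running product of nb = n_bins reversed
def pvEncGo (nb : List Int) (rd : List Int) (k : Nat) (prod : Int) (out : Int) : Int :=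
  match rd with
  | [] => out
  | d :: rest =>
      pvEncGo nb rest (k + 1) (if k < nb.length then prod * nb.getD k 1 else prod) (out + prod * d)

def encode_cartpole_alt (n_bins : List Int) (digits : List Int) : Int :=
  pvEncGo n_bins.reverse digits.reverse 0 1 0

-- ===== PRECONDITION & SPEC =====
-- Pre_ excludes exactly the inputs on which A raises TypeError: reduce over the empty n_bins when len(digits) ≥ 2.
def Pre_encode_cartpole (n_bins : List Int) (digits : List Int) : Prop :=
  digits.length ≤ 1 ∨ n_bins ≠ []
instance (n_bins : List Int) (digits : List Int) : Decidable (Pre_encode_cartpole n_bins digits) := by unfold Pre_encode_cartpole; infer_instance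
def pvWitness_encode_cartpole : List Int × List Int := ([3, 4], [1, 2])

def Spec_encode_cartpole (n_bins : List Int) (digits : List Int) (out : Int) : Prop := out = encode_cartpole_alt n_bins digits
instance (n_bins : List Int) (digits : List Int) (out : Int) : Decidable (Spec_encode_cartpole n_bins digits out) := by unfold Spec_encode_cartpole; infer_instance

-- ===== CLAIM (what is proved, stated in full; the proofs are below) =====
def Claim_equal_encode_cartpole : Prop := ∀ (n_bins : List Int) (digits : List Int), Dom_encode_cartpole n_bins digits → Pre_encode_cartpole n_bins digits → Spec_encode_cartpole n_bins digits (encode_cartpole n_bins digits)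

-- ===== LEMMAS AND PROOFS =====

theorem foldl_mul_start (t : List Int) : ∀ a : Int, t.foldl (· * ·) a = a * t.prod := by
  induction t with
  | nil => intro a; simp
  | cons h tl ih => intro a; simp [List.foldl_cons, ih, List.prod_cons]; ring

theorem pvReduceMul_eq_prod (l : List Int) (h : l ≠ []) : pvReduceMul l = l.prod := by
  cases l with
  | nil => exact absurd rfl h
  | cons x t => simp [pvReduceMul, foldl_mul_start, List.prod_cons]

theorem foldl_add_fn (f : Int → Int) (l : List Int) : ∀ a : Int, l.foldl (fun o i => o + f i) a = a + (l.map f).sum := by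
  induction l with
  | nil => intro a; simp
  | cons x t ih => intro a; simp [List.foldl_cons, ih]; ring

-- B's loop computes the running-product sum
theorem pvEncGo_sum (nb : List Int) (rd : List Int) :
    ∀ (k : Nat) (out : Int),
      pvEncGo nb rd k ((nb.take k).prod) out
        = out + ((List.range rd.length).map (fun j => (nb.take (k + j)).prod * rd.getD j 0)).sum := by
  induction rd with
  | nil => intro k out; simp [pvEncGo]
  | cons d rest ih =>
      intro k out
      have hp : (if k < nb.length then (nb.take k).prod * nb.getD k 1 else (nb.take k).prod)
          = (nb.take (k + 1)).prod := by
        by_cases hk : k < nb.length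
        · have hg : nb[k]? = some nb[k] := List.getElem?_eq_getElem hk
          rw [if_pos hk, List.take_add_one, hg, List.prod_append]
          simp [List.getD_eq_getElem?_getD, hg]
        · rw [if_neg hk, List.take_add_one, List.getElem?_eq_none_iff.mpr (Nat.le_of_not_lt hk)]
          simp
      rw [pvEncGo, hp, ih (k + 1) (out + (nb.take k).prod * d)]
      have hmap : ((fun j => (nb.take (k + j)).prod * (d :: rest).getD j 0) ∘ Nat.succ)
          = (fun j => (nb.take (k + 1 + j)).prod * rest.getD j 0) := by
        funext j
        simp only [Function.comp_apply, List.getD_cons_succ]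
        have h3 : k + Nat.succ j = k + 1 + j := by omega
        rw [h3]
      rw [List.length_cons, List.range_succ_eq_map, List.map_cons, List.map_map, List.sum_cons,
        hmap]
      simp only [List.getD_cons_zero]
      ring

theorem encode_cartpole_alt_eq_sum (n_bins : List Int) (digits : List Int) :
    encode_cartpole_alt n_bins digits
      = ((List.range digits.length).map
          (fun j => (n_bins.reverse.take j).prod * digits.reverse.getD j 0)).sum := by
  have h := pvEncGo_sum n_bins.reverse digits.reverse 0 0
  simpa [encode_cartpole_alt] using h

-- A's suffix-slice product equals the prefix product of the reversed list
theorem slice_prod_eq (n_bins : List Int) (k : Nat) (hk : 0 < k) (hne : n_bins ≠ []) :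
    pvReduceMul (PySem.List.slice n_bins (some (-(k : Int))) none) = (n_bins.reverse.take k).prod := by
  rw [PySem.List.slice_from_neg_natCast n_bins k hk]
  have hdrop_ne : n_bins.drop (n_bins.length - k) ≠ [] := by
    have : n_bins.length - k < n_bins.length := by
      have := List.length_pos_iff.mpr hne; omega
    simp [List.drop_eq_nil_iff]; omega
  rw [pvReduceMul_eq_prod _ hdrop_ne]
  by_cases hle : k ≤ n_bins.length
  · rw [List.take_reverse]
    · rw [List.prod_reverse]
  · have h1 : n_bins.length - k = 0 := by omega
    have h2 : n_bins.reverse.take k = n_bins.reverse := by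
      apply List.take_of_length_le; simp; omega
    simp [h1, h2, List.prod_reverse]

-- ===== VERDICT (by name: the statement is the Claim_ definition above) =====
theorem encode_cartpole_spec : Claim_equal_encode_cartpole := by
  intro n_bins digits _ hpre
  unfold Spec_encode_cartpole
  rw [encode_cartpole_alt_eq_sum]
  unfold encode_cartpole
  have hbody : (fun (out : Int) (i : Int) =>
      if i == 0 then out + PySem.List.pyGetD digits (-(i + 1)) 0
      else out + pvReduceMul (PySem.List.slice n_bins (some (-i)) none) * PySem.List.pyGetD digits (-(i + 1)) 0)
      = (fun (out : Int) (i : Int) => out +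
          (if i == 0 then PySem.List.pyGetD digits (-(i + 1)) 0
           else pvReduceMul (PySem.List.slice n_bins (some (-i)) none) * PySem.List.pyGetD digits (-(i + 1)) 0)) := by
    funext o i; by_cases h : i = 0 <;> simp [h]
  rw [hbody, foldl_add_fn, List.map_reverse, List.sum_reverse]
  rw [PySem.List.pyRange_zero_natCast, List.map_map]
  rw [Int.zero_add]
  apply congrArg
  apply List.map_congr_left
  intro k hk
  have hkL : k < digits.length := List.mem_range.mp hk
  have hget : PySem.List.pyGetD digits (-((k : Int) + 1)) 0 = digits.reverse.getD k 0 := by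
    have h1 : -((k : Int) + 1) = -(((k + 1 : Nat) : Int)) := by push_cast; ring
    rw [h1, PySem.List.pyGetD_neg_natCast digits (k+1) 0 (by omega) (by omega)]
    rw [List.getD_eq_getElem digits.reverse 0 (by simpa using hkL)]
    rw [List.getElem_reverse]
    congr 1; omega
  simp only [Function.comp]
  by_cases hk0 : k = 0
  · subst hk0
    simpa using hget
  · have hcond : ((k : Int) == 0) = false := by simp; omega
    simp only [hcond, Bool.false_eq_true, if_false]
    have hne : n_bins ≠ [] := by
      rcases hpre with h | h
      · omega
      · exact h
    rw [slice_prod_eq n_bins k (by omega) hne, hget]
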